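-- pv_equiv track=rewrite | github.com/AprilV/IS305-Python | Video_Assignments/Week_3_Minecraft/minecraft_crafting.py | craft
-- ===== SOURCE A (Python) =====
-- def count_items(items_list):
--     counts = {}
--     for item in items_list:
--         if item in counts:
--             counts[item] += 1
--         else:
--             counts[item] = 1
--     return counts
--
-- def can_craft(inventory, recipe_ingredients):
--     recipe_counts = count_items(recipe_ingredients)
--     for ingredient_name, amount_needed in recipe_counts.items():
--         if inventory.get(ingredient_name, 0) < amount_needed:
--             return False
--     return True
--
-- def craft(inventory, item_name, recipes):
--     recipe_found = None
--     for recipe in recipes: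
--         if recipe[0] == item_name:
--             recipe_found = recipe
--             break
--
--     if recipe_found is None:
--         raise Exception(f"Unknown recipe: {item_name}")
--
--     ingredients = recipe_found[1]
--
--     if not can_craft(inventory, ingredients):
--         return None
--
--     new_inventory = inventory.copy()
--
--     recipe_counts = count_items(ingredients)
--     for ingredient_name, amount_needed in recipe_counts.items():
--         new_inventory[ingredient_name] -= amount_needed
--
--     if item_name in new_inventory:
--         new_inventory[item_name] += 1
--     else:
--         new_inventory[item_name] = 1
--
--     return new_inventory
-- ===== SOURCE B (Python) =====
-- def craft(inventory, item_name, recipes):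
--     for recipe_name, ingredients in recipes:
--         if recipe_name == item_name:
--             break
--     else:
--         raise Exception(f"Unknown recipe: {item_name}")
--
--     new_inventory = dict(inventory)
--     for ingredient in ingredients:
--         new_inventory[ingredient] = new_inventory.get(ingredient, 0) - 1
--
--     if any(new_inventory.get(ingredient, 0) < 0 for ingredient in ingredients):
--         return None
--
--     new_inventory[item_name] = new_inventory.get(item_name, 0) + 1
--     return new_inventory
-- ===== Notes on version B (the rewrite author's own statement) =====
-- stated objective: simpler
-- what changed: Drops the count_items aggregation and the separate can_craft feasibility pass: B copies the inventory once, decrements a balance per raw ingredient occurrence (missing keys default to 0), returns None if any required balance went negative, else increments the crafted item.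
import Mathlib
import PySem

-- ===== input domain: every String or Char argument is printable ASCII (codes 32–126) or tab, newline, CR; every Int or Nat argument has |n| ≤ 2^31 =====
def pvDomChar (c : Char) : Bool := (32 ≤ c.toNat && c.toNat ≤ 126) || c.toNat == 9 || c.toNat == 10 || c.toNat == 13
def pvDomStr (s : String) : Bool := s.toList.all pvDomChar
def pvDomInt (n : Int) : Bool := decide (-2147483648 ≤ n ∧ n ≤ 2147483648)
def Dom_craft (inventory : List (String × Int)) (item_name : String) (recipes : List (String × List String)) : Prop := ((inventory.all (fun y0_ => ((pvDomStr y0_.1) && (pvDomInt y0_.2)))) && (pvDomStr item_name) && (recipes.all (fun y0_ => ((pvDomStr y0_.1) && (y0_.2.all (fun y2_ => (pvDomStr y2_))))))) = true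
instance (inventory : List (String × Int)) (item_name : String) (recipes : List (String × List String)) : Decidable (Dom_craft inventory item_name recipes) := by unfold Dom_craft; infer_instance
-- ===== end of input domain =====

-- B drops the count_items/can_craft double pass: it decrements a copied inventory per ingredient
-- occurrence and checks for negative balances afterwards (simpler decomposition, same cost).


-- ===== PORT A =====
-- 'for recipe in recipes: if recipe[0] == item_name: recipe_found = recipe; break'
def findRecipe (item_name : String) : List (String × List String) → Option (String × List String)
  | [] => none
  | r :: rs => if r.1 == item_name then some r else findRecipe item_name rs

-- count_items: Counter over the ingredient list (PySem.Dict.counter is exactly this loop)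
def countItems (items_list : List String) : PySem.Dict String Int :=
  PySem.Dict.counter items_list

-- can_craft: every distinct ingredient's needed amount is available
def canCraft (inventory : PySem.Dict String Int) (recipe_ingredients : List String) : Bool :=
  (countItems recipe_ingredients).items.all (fun p => decide (p.2 ≤ inventory.getD p.1 0))

def craft (inventory : List (String × Int)) (item_name : String) (recipes : List (String × List String)) : Option (List (String × Int)) :=
  match findRecipe item_name recipes with
  | none => none  -- Python raises Exception here; excluded by Pre_craft
  | some recipe_found =>
    let ingredients := recipe_found.2
    let inv := PySem.Dict.ofList inventory
    if canCraft inv ingredients then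
      -- new_inventory[name] -= amount for each (name, amount) in count_items(ingredients)
      let new_inventory := (countItems ingredients).items.foldl
        (fun d p => d.insert p.1 (d.getD p.1 0 - p.2)) inv
      some ((new_inventory.insert item_name (new_inventory.getD item_name 0 + 1)).items)
    else none

-- ===== PORT B =====
def craft_alt (inventory : List (String × Int)) (item_name : String) (recipes : List (String × List String)) : Option (List (String × Int)) :=
  match findRecipe item_name recipes with
  | none => none  -- Python raises Exception here; excluded by Pre_craft
  | some recipe =>
    let new_inventory := recipe.2.foldl
      (fun d g => d.insert g (d.getD g 0 - 1)) (PySem.Dict.ofList inventory)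
    if recipe.2.any (fun g => decide (new_inventory.getD g 0 < 0)) then none
    else some ((new_inventory.insert item_name (new_inventory.getD item_name 0 + 1)).items)

-- ===== PRECONDITION & SPEC =====
-- Pre_craft excludes exactly the inputs where A raises Exception ("Unknown recipe"): no recipe named item_name.
def Pre_craft (inventory : List (String × Int)) (item_name : String) (recipes : List (String × List String)) : Prop :=
  ∃ r ∈ recipes, r.1 = item_name
instance (inventory : List (String × Int)) (item_name : String) (recipes : List (String × List String)) : Decidable (Pre_craft inventory item_name recipes) := by unfold Pre_craft; infer_instance

def pvWitness_craft : (List (String × Int)) × String × (List (String × List String)) :=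
  ([("wood", 3), ("stick", 1)], "torch", [("torch", ["wood", "wood", "stick"])])

def Spec_craft (inventory : List (String × Int)) (item_name : String) (recipes : List (String × List String)) (out : Option (List (String × Int))) : Prop := out = craft_alt inventory item_name recipes
instance (inventory : List (String × Int)) (item_name : String) (recipes : List (String × List String)) (out : Option (List (String × Int))) : Decidable (Spec_craft inventory item_name recipes out) := by unfold Spec_craft; infer_instance

-- ===== CLAIM (what is proved, stated in full; the proofs are below) =====
def Claim_equal_craft : Prop := ∀ (inventory : List (String × Int)) (item_name : String) (recipes : List (String × List String)), Dom_craft inventory item_name recipes → Pre_craft inventory item_name recipes → Spec_craft inventory item_name recipes (craft inventory item_name recipes)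

-- ===== LEMMAS AND PROOFS =====

-- B's decrement loop: final balance at any key is the start balance minus the occurrence count.
theorem getD_foldl_insert_sub_one (l : List String) (d : PySem.Dict String Int) (k : String) :
    (l.foldl (fun d g => d.insert g (d.getD g 0 - 1)) d).getD k 0 = d.getD k 0 - l.count k := by
  induction l generalizing d with
  | nil => simp
  | cons x xs ih =>
    simp only [List.foldl_cons, ih, PySem.Dict.getD_insert, List.count_cons]
    by_cases h : k = x
    · subst h; simp; ring
    · simp [h, Ne.symm h]

-- A fold of inserts over keys not containing k leaves getD k untouched.
theorem getD_foldl_insert_of_not_mem {β : Type} (ps : List β) (key : β → String)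
    (f : PySem.Dict String Int → β → Int) (d : PySem.Dict String Int) (k : String)
    (h : k ∉ ps.map key) :
    (ps.foldl (fun d p => d.insert (key p) (f d p)) d).getD k 0 = d.getD k 0 := by
  induction ps generalizing d with
  | nil => simp
  | cons p ps ih =>
    simp only [List.map_cons, List.mem_cons, not_or] at h
    simp only [List.foldl_cons, ih _ h.2, PySem.Dict.getD_insert, if_neg h.1]

-- A's subtraction loop over distinct keys: getD k is start minus w k if k occurs, else unchanged.
theorem getD_foldl_insert_sub_map (ks : List String) (w : String → Int)
    (d : PySem.Dict String Int) (k : String) (hnd : ks.Nodup) :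
    ((ks.map (fun x => (x, w x))).foldl (fun d p => d.insert p.1 (d.getD p.1 0 - p.2)) d).getD k 0
      = if k ∈ ks then d.getD k 0 - w k else d.getD k 0 := by
  induction ks generalizing d with
  | nil => simp
  | cons x xs ih =>
    rcases List.nodup_cons.mp hnd with ⟨hx, hxs⟩
    simp only [List.map_cons, List.foldl_cons]
    by_cases h : k = x
    · subst h
      have : k ∉ (xs.map (fun x => (x, w x))).map Prod.fst := by
        simpa using hx
      rw [getD_foldl_insert_of_not_mem (key := Prod.fst)
            (f := fun d p => d.getD p.1 0 - p.2) _ _ _ this]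
      simp
    · rw [ih _ hxs]
      simp [PySem.Dict.getD_insert, h, List.mem_cons]

-- A's subtraction over Counter items equals balance minus occurrence count, for every key.
theorem getD_subA (l : List String) (d : PySem.Dict String Int) (k : String) :
    ((PySem.Dict.counter l (κ := String)).items.foldl
        (fun d p => d.insert p.1 (d.getD p.1 0 - p.2)) d).getD k 0
      = d.getD k 0 - l.count k := by
  rw [PySem.Dict.items_counter]
  rw [getD_foldl_insert_sub_map (PySem.Set.ofList l) (fun x => (l.count x : Int)) d k
        (PySem.Set.nodup_ofList l)]
  by_cases h : k ∈ l
  · simp [PySem.Set.mem_ofList, h]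
  · simp [PySem.Set.mem_ofList, h, List.count_eq_zero_of_not_mem h]

-- The two success dicts (before adding the crafted item) are equal.
theorem sub_dicts_eq (l : List String) (d : PySem.Dict String Int) (hnd : d.keys.Nodup) :
    ((PySem.Dict.counter l (κ := String)).items.foldl
        (fun d p => d.insert p.1 (d.getD p.1 0 - p.2)) d)
      = l.foldl (fun d g => d.insert g (d.getD g 0 - 1)) d := by
  set dA := ((PySem.Dict.counter l (κ := String)).items.foldl
      (fun d p => d.insert p.1 (d.getD p.1 0 - p.2)) d) with hdA
  set dB := l.foldl (fun d g => d.insert g (d.getD g 0 - 1)) d with hdB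
  have hkA : dA.keys = PySem.Set.update d.keys ((PySem.Dict.counter l (κ := String)).items.map Prod.fst) := by
    rw [hdA]
    exact PySem.Dict.keys_foldl_insert_key _ _ _ _
  have hkB : dB.keys = PySem.Set.update d.keys l := by
    rw [hdB]
    exact PySem.Dict.keys_foldl_insert _ _ _
  have hmapfst : (PySem.Dict.counter l (κ := String)).items.map Prod.fst = PySem.Set.ofList l := by
    have := PySem.Dict.keys_counter (κ := String) l
    simpa [PySem.Dict.keys] using this
  have hkeys : dA.keys = dB.keys := by
    rw [hkA, hkB, hmapfst]
    rw [PySem.Set.update_eq_append_filter, PySem.Set.update_eq_append_filter,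
        PySem.Set.ofList_ofList]
  have hndA : dA.keys.Nodup := by
    rw [hdA]; exact PySem.Dict.nodup_keys_foldl_insert_key _ _ _ _ hnd
  have hndB : dB.keys.Nodup := by
    rw [hdB]; exact PySem.Dict.nodup_keys_foldl_insert _ _ _ hnd
  apply PySem.Dict.ext
  rw [PySem.Dict.items_eq_map_keys dA hndA 0, PySem.Dict.items_eq_map_keys dB hndB 0, hkeys]
  apply List.map_congr_left
  intro k _
  rw [hdA, hdB, getD_subA, getD_foldl_insert_sub_one]

-- The feasibility test of A and the negative-balance test of B are complementary.
theorem cond_eq (l : List String) (d : PySem.Dict String Int) :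
    ((PySem.Dict.counter l (κ := String)).items.all (fun p => decide (p.2 ≤ d.getD p.1 0)))
      = !(l.any (fun g =>
          decide ((l.foldl (fun d g => d.insert g (d.getD g 0 - 1)) d).getD g 0 < 0))) := by
  rw [Bool.eq_iff_iff, List.all_eq_true, Bool.not_eq_true', Bool.eq_false_iff, Ne,
      List.any_eq_true]
  constructor
  · rintro h ⟨g, hg, hlt⟩
    rw [getD_foldl_insert_sub_one] at hlt
    have hmem : (g, (l.count g : Int)) ∈ (PySem.Dict.counter l (κ := String)).items := by
      rw [PySem.Dict.items_counter]
      exact List.mem_map.mpr ⟨g, (PySem.Set.mem_ofList _ _).mpr hg, rfl⟩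
    have := h _ hmem
    simp only [decide_eq_true_eq] at this hlt
    omega
  · intro h p hp
    rw [PySem.Dict.items_counter] at hp
    rcases List.mem_map.mp hp with ⟨g, hg, rfl⟩
    rw [PySem.Set.mem_ofList] at hg
    by_contra hc
    exact h ⟨g, hg, by
      rw [getD_foldl_insert_sub_one]
      simp only [decide_eq_true_eq] at hc ⊢
      omega⟩

-- ===== VERDICT (by name: the statement is the Claim_ definition above) =====
theorem craft_spec : Claim_equal_craft := by
  intro inventory item_name recipes _dom _pre
  unfold Spec_craft craft craft_alt
  cases hfind : findRecipe item_name recipes with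
  | none => rfl
  | some recipe =>
    simp only [countItems, canCraft]
    rw [cond_eq recipe.2 (PySem.Dict.ofList inventory)]
    by_cases hany : recipe.2.any (fun g =>
        decide ((recipe.2.foldl (fun d g => d.insert g (d.getD g 0 - 1))
          (PySem.Dict.ofList inventory)).getD g 0 < 0)) = true
    · simp [hany]
    · simp only [Bool.not_eq_true] at hany
      simp only [hany, Bool.not_false, if_true, Bool.false_eq_true, if_false]
      rw [sub_dicts_eq recipe.2 (PySem.Dict.ofList inventory)
            (PySem.Dict.nodup_keys_ofList inventory)]
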